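-- pv_equiv track=rewrite | github.com/sarahmacharg/detecting-cdes-niddk-pub | bin/parse_codebook.py | get_start_indices
-- ===== SOURCE A (Python) =====
-- def get_start_indices(line, columns):
--     """
--     :param line: string. The dashed line that separates codebook column names from codebook content
--     :param columns: list(string). List of string column names extracted from the column headings of the codebook
--     :return: (list(int), int, int). Tuple containing list of the widths of each section in the codebook (in # of
--     characters), integer index where 'Description' column begins, and integer index where 'Code' column begins.
--
--     """
--     description_start = 0
--     sections = line.split()
--     for j, section in enumerate(sections):
--         if j < columns.index('Description'):
--             description_start += len(section) + 1
--     code_start = description_start + len(sections[columns.index('Description')]) + 1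
--     section_lengths = []
--     for section in sections:
--         section_lengths.append(len(section))
--     return section_lengths, description_start, code_start
-- ===== SOURCE B (Python) =====
-- def get_start_indices(line, columns):
--     def go(sections, d):
--         if d == 0:
--             return [len(s) for s in sections], 0, len(sections[0]) + 1
--         lengths, ds, cs = go(sections[1:], d - 1)
--         w = len(sections[0]) + 1
--         return [w - 1] + lengths, ds + w, cs + w
--     return go(line.split(), columns.index('Description'))
-- ===== Notes on version B (the rewrite author's own statement) =====
-- stated objective: alternative
-- what changed: Replaces A's two iterative passes (a conditional enumerate-accumulator calling columns.index per section, plus a separate append loop for lengths) with a single structural recursion on the section list that builds lengths, description_start and code_start together, shifting both start offsets by len(head)+1 as the recursion unwinds.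
import Mathlib
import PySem

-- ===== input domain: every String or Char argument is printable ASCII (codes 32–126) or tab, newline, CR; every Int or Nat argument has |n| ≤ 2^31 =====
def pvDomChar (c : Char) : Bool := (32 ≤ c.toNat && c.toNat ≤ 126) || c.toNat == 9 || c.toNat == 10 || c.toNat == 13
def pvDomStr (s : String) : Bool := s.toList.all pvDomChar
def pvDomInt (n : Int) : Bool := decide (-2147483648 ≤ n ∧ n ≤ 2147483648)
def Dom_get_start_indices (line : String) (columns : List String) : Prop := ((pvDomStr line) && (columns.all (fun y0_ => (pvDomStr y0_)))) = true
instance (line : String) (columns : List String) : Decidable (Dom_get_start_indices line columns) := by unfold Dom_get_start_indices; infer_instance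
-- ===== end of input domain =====

-- B replaces A's iterative conditional accumulation by a structural recursion on the section
-- list that returns all three results at once, shifting both starts as it unwinds (alternative
-- decomposition; same return value on Pre_).

-- ===== PORT A =====
def get_start_indices (line : String) (columns : List String) : List Int × Int × Int :=
  let sections := PySem.Str.split₀ line
  let idx : Nat := (PySem.List.index? columns "Description").getD 0
  let description_start : Int :=
    (PySem.List.enumerate sections).foldl
      (fun acc p => if p.1 < (idx : Int) then acc + PySem.Str.len p.2 + 1 else acc) 0
  let code_start : Int :=
    description_start + PySem.Str.len (PySem.List.pyGetD sections (idx : Int) "") + 1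
  let section_lengths : List Int :=
    sections.foldl (fun acc s => acc ++ [PySem.Str.len s]) []
  (section_lengths, description_start, code_start)

-- ===== PORT B =====
-- recursive helper go(sections, d) of Source B; the [], d+1 case is Python's IndexError
-- (sections[0] on the empty list), excluded by Pre_ — the returned triple there is arbitrary.
def pvGo : List String → Nat → List Int × Int × Int
  | sections, 0 =>
      (sections.map (fun s => PySem.Str.len s), 0,
       PySem.Str.len (PySem.List.pyGetD sections 0 "") + 1)
  | [], _ + 1 => ([], 0, 0)
  | s :: t, d + 1 =>
      let r := pvGo t d
      let w : Int := PySem.Str.len s + 1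
      ((w - 1) :: r.1, r.2.1 + w, r.2.2 + w)

def get_start_indices_alt (line : String) (columns : List String) : List Int × Int × Int :=
  pvGo (PySem.Str.split₀ line) ((PySem.List.index? columns "Description").getD 0)

-- ===== PRECONDITION & SPEC =====
-- Pre_ excludes exactly the inputs where Python A raises: ValueError when 'Description' is not in
-- columns, IndexError when its index is ≥ the number of whitespace-separated sections of line.
def Pre_get_start_indices (line : String) (columns : List String) : Prop :=
  "Description" ∈ columns ∧
    (PySem.List.index? columns "Description").getD 0 < (PySem.Str.split₀ line).length
instance (line : String) (columns : List String) : Decidable (Pre_get_start_indices line columns) := by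
  unfold Pre_get_start_indices; infer_instance

def pvWitness_get_start_indices : String × List String :=
  ("---- ----------- -----", ["Variable", "Description", "Code"])

def Spec_get_start_indices (line : String) (columns : List String) (out : List Int × Int × Int) : Prop := out = get_start_indices_alt line columns
instance (line : String) (columns : List String) (out : List Int × Int × Int) : Decidable (Spec_get_start_indices line columns out) := by unfold Spec_get_start_indices; infer_instance

-- ===== CLAIM (what is proved, stated in full; the proofs are below) =====
def Claim_equal_get_start_indices : Prop := ∀ (line : String) (columns : List String), Dom_get_start_indices line columns → Pre_get_start_indices line columns → Spec_get_start_indices line columns (get_start_indices line columns)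

-- ===== LEMMAS AND PROOFS =====

-- per-section weight len(s)+1
def pvW (s : String) : Int := PySem.Str.len s + 1

-- A's enumerate loop sums the weights of sections before position d
theorem pvA_desc (l : List String) (d : Nat) :
    ∀ (s : Int) (init : Int),
      (PySem.List.enumerate l s).foldl
        (fun acc p => if p.1 < (d : Int) then acc + PySem.Str.len p.2 + 1 else acc) init
      = init + (((l.take ((d - s).toNat)).map pvW).sum) := by
  induction l with
  | nil => intro s init; simp [PySem.List.enumerate]
  | cons x xs ih =>
    intro s init
    rw [PySem.List.enumerate_cons]
    simp only [List.foldl_cons]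
    by_cases h : s < (d : Int)
    · have h1 : ((d : Int) - s).toNat = ((d : Int) - (s + 1)).toNat + 1 := by omega
      rw [if_pos h, ih (s + 1), h1]
      simp [List.take_succ_cons, pvW]
      ring
    · have h0 : ((d : Int) - s).toNat = 0 := by omega
      have h0' : ((d : Int) - (s + 1)).toNat = 0 := by omega
      rw [if_neg h, ih (s + 1), h0, h0']
      simp

-- characterisation of B's recursion on in-range indices
theorem pvGo_eq (d : Nat) : ∀ (l : List String) (hdl : d < l.length),
    pvGo l d = (l.map (fun s => PySem.Str.len s),
                ((l.take d).map pvW).sum,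
                ((l.take d).map pvW).sum + pvW l[d]) := by
  induction d with
  | zero =>
    intro l hdl
    match l, hdl with
    | s :: t, _ =>
      simp [pvGo, pvW, PySem.List.pyGetD, PySem.List.pyGet?, PySem.List.pyIdx?]
  | succ d ih =>
    intro l hdl
    match l, hdl with
    | s :: t, hdl =>
      have hdt : d < t.length := by simpa using hdl
      simp only [pvGo, ih t hdt]
      simp [pvW]
      constructor <;> ring

-- ===== VERDICT (by name: the statement is the Claim_ definition above) =====
theorem get_start_indices_spec : Claim_equal_get_start_indices := by
  intro line columns _ hpre
  obtain ⟨hmem, hlt⟩ := hpre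
  unfold Spec_get_start_indices get_start_indices get_start_indices_alt
  set l := PySem.Str.split₀ line with hl
  set d : Nat := (PySem.List.index? columns "Description").getD 0 with hd
  have hdl : d < l.length := hlt
  have hlen : l.foldl (fun acc s => acc ++ [PySem.Str.len s]) [] = l.map (fun s => PySem.Str.len s) := by
    simpa using PySem.List.foldl_append_singleton_eq_map (fun s => PySem.Str.len s) l []
  have hdesc :
      (PySem.List.enumerate l).foldl
        (fun acc p => if p.1 < (d : Int) then acc + PySem.Str.len p.2 + 1 else acc) 0
      = ((l.take d).map pvW).sum := by
    have := pvA_desc l d 0 0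
    simpa using this
  have hA_get : PySem.List.pyGetD l (d : Int) "" = l[d] :=
    PySem.List.pyGetD_ofNat l d "" hdl
  rw [pvGo_eq d l hdl]
  simp only [hlen, hdesc, hA_get]
  simp [pvW]
  ring
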